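-- pv_equiv track=rewrite | github.com/messernoa29/test | api/services/prospect.py | _scan_balanced
-- ===== SOURCE A (Python) =====
-- from typing import Optional
--
-- def _scan_balanced(text: str, start: int) -> Optional[str]:
--     depth = 0
--     in_string = False
--     escape = False
--     for i in range(start, len(text)):
--         ch = text[i]
--         if in_string:
--             if escape:
--                 escape = False
--             elif ch == "\\":
--                 escape = True
--             elif ch == '"':
--                 in_string = False
--             continue
--         if ch == '"':
--             in_string = True
--         elif ch == "{":
--             depth += 1
--         elif ch == "}":
--             depth -= 1
--             if depth == 0:
--                 return text[start : i + 1]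
--     return None
-- ===== SOURCE B (Python) =====
-- from typing import Optional
--
-- def _scan_balanced(text: str, start: int) -> Optional[str]:
--     n = len(text)
--     # Stage 1: materialize the visited character sequence.
--     chars = [text[i] for i in range(start, n)]
--     # Stage 2: classify each visited position as outside/inside a string literal
--     # with a 3-state machine (0=outside, 1=in string, 2=after backslash).
--     mask = []
--     state = 0
--     for ch in chars:
--         mask.append(state == 0)
--         if state == 2:
--             state = 1
--         elif state == 1:
--             if ch == "\\":
--                 state = 2
--             elif ch == '"':
--                 state = 0
--         elif ch == '"':
--             state = 1
--     # Stage 3: signed brace deltas outside strings.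
--     deltas = [(1 if ch == "{" else -1) if (out and ch in "{}") else 0
--               for ch, out in zip(chars, mask)]
--     # Stage 4: running sum; the answer ends at the first '}' whose prefix sum is zero.
--     depth = 0
--     for k, d in enumerate(deltas):
--         depth += d
--         if d == -1 and depth == 0:
--             return text[start : start + k + 1]
--     return None
-- ===== Notes on version B (the rewrite author's own statement) =====
-- stated objective: alternative
-- what changed: Replaced A's single stateful pass (depth/in_string/escape flags with early return) by four staged passes: materialize the visited characters, compute an outside-string boolean mask with a 3-state machine, map masked braces to +1/-1 deltas, then scan the running prefix sum for the first '}' that brings it to zero.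
-- outside the precondition, e.g. on _scan_balanced('{}', -3): A raises IndexError, B raises IndexError
import Mathlib
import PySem

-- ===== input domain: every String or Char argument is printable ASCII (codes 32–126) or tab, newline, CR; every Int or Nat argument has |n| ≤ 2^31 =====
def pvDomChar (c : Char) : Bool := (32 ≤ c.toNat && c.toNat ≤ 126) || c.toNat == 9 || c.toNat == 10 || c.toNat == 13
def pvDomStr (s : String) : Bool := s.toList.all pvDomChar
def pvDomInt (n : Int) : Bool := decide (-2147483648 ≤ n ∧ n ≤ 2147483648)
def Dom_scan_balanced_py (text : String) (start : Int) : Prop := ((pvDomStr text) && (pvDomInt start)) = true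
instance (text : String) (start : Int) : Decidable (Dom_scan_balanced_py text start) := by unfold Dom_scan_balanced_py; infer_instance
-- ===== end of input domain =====

-- B replaces A's single stateful pass by staged passes: gather the visited characters, compute an
-- outside-string mask, turn braces into ±1 deltas, then scan the prefix sums (objective: alternative).

-- ===== PORT A =====
-- A's for-loop over range(start, len(text)) with state (depth, in_string, escape); early return
-- when depth reaches 0 on a '}'.  pyGet? is none exactly where Python raises IndexError
-- (only reachable when start < -len, excluded by Pre_).
def pvLoopA (t : List Char) (start : Int) : List Int → Int → Bool → Bool → Option String
  | [], _, _, _ => none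
  | i :: rest, depth, instr, esc =>
    match PySem.List.pyGet? t i with
    | none => none   -- IndexError in Python; excluded by Pre_
    | some ch =>
      if instr then
        if esc then pvLoopA t start rest depth true false
        else if ch = '\\' then pvLoopA t start rest depth true true
        else if ch = '"' then pvLoopA t start rest depth false false
        else pvLoopA t start rest depth true false
      else if ch = '"' then pvLoopA t start rest depth true false
      else if ch = '{' then pvLoopA t start rest (depth + 1) false false
      else if ch = '}' then
        if depth - 1 = 0 then some (String.ofList (PySem.List.slice t (some start) (some (i + 1))))
        else pvLoopA t start rest (depth - 1) false false
      else pvLoopA t start rest depth false false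

def scan_balanced_py (text : String) (start : Int) : Option String :=
  pvLoopA text.toList start (PySem.List.pyRange start (text.toList.length : Int) 1) 0 false false

-- ===== PORT B =====
-- stage 1 of Source B: the list comprehension [text[i] for i in range(start, n)]; none = IndexError
def pvGather (t : List Char) : List Int → Option (List Char)
  | [] => some []
  | i :: rest =>
    match PySem.List.pyGet? t i with
    | none => none   -- IndexError in Python; excluded by Pre_
    | some c =>
      match pvGather t rest with
      | none => none
      | some cs => some (c :: cs)

-- stage 2 of Source B: outside-string mask via the 3-state machine (0 outside, 1 in string, 2 escape)
def pvMask : List Char → Int → List Bool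
  | [], _ => []
  | ch :: cs, st =>
    decide (st = 0) ::
      pvMask cs (if st = 2 then 1
                 else if st = 1 then (if ch = '\\' then 2 else if ch = '"' then 0 else 1)
                 else (if ch = '"' then 1 else 0))

-- stage 3 of Source B: signed brace deltas outside strings (zip truncates like Python's zip)
def pvDeltas : List Char → List Bool → List Int
  | ch :: cs, out :: os =>
      (if out && (ch = '{' || ch = '}') then (if ch = '{' then 1 else -1) else 0) :: pvDeltas cs os
  | _, _ => []

-- stage 4 of Source B: running sum over the deltas, k = enumerate index
def pvStage4 (t : List Char) (start : Int) : List Int → Int → Int → Option String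
  | [], _, _ => none
  | d :: rest, k, depth =>
    if d = -1 ∧ depth + d = 0 then
      some (String.ofList (PySem.List.slice t (some start) (some (start + k + 1))))
    else pvStage4 t start rest (k + 1) (depth + d)

def scan_balanced_py_alt (text : String) (start : Int) : Option String :=
  match pvGather text.toList (PySem.List.pyRange start (text.toList.length : Int) 1) with
  | none => none
  | some chars => pvStage4 text.toList start (pvDeltas chars (pvMask chars 0)) 0 0

-- ===== PRECONDITION & SPEC =====
-- Pre_ excludes exactly start < -len(text), where Python A raises IndexError on its first index access.
def Pre_scan_balanced_py (text : String) (start : Int) : Prop := -(text.toList.length : Int) ≤ start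
instance (text : String) (start : Int) : Decidable (Pre_scan_balanced_py text start) := by unfold Pre_scan_balanced_py; infer_instance

def pvWitness_scan_balanced_py : String × Int := ("{\"a\": 1}", 0)

def Spec_scan_balanced_py (text : String) (start : Int) (out : Option String) : Prop := out = scan_balanced_py_alt text start
instance (text : String) (start : Int) (out : Option String) : Decidable (Spec_scan_balanced_py text start out) := by unfold Spec_scan_balanced_py; infer_instance

-- ===== CLAIM (what is proved, stated in full; the proofs are below) =====
def Claim_equal_scan_balanced_py : Prop := ∀ (text : String) (start : Int), Dom_scan_balanced_py text start → Pre_scan_balanced_py text start → Spec_scan_balanced_py text start (scan_balanced_py text start)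

-- ===== LEMMAS AND PROOFS =====

theorem pv_range_nil (a b : Int) (h : b ≤ a) : PySem.List.pyRange a b 1 = [] := by
  rw [PySem.List.pyRange_one]
  have : (b - a).toNat = 0 := by omega
  simp [this]

theorem pv_get_some (t : List Char) (i : Int) (h1 : -(t.length : Int) ≤ i) (h2 : i < (t.length : Int)) :
    ∃ c, PySem.List.pyGet? t i = some c := by
  cases hg : PySem.List.pyGet? t i with
  | none =>
    rw [PySem.List.pyGet?_eq_none_iff] at hg
    exact absurd ⟨h1, h2⟩ hg
  | some c => exact ⟨c, rfl⟩

-- under Pre_, the comprehension of stage 1 never raises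
theorem pv_gather_some (t : List Char) : ∀ (m : Nat) (i : Int),
    ((t.length : Int) - i).toNat = m → -(t.length : Int) ≤ i →
    ∃ cs, pvGather t (PySem.List.pyRange i (t.length : Int) 1) = some cs := by
  intro m
  induction m with
  | zero =>
    intro i hm hlo
    rw [pv_range_nil _ _ (by omega)]
    exact ⟨[], rfl⟩
  | succ m ih =>
    intro i hm hlo
    have hlt : i < (t.length : Int) := by omega
    rw [PySem.List.pyRange_one_cons hlt]
    obtain ⟨c, hc⟩ := pv_get_some t i hlo hlt
    obtain ⟨cs, hcs⟩ := ih (i + 1) (by omega) (by omega)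
    exact ⟨c :: cs, by rw [pvGather, hc, hcs]⟩

-- main invariant: A's loop from index i with state st ∈ {0,1,2} (instr = st ≠ 0, esc = st = 2)
-- equals B's staged pipeline over the remaining visited characters, with k = i - start.
theorem pv_main (t : List Char) (start : Int) : ∀ (m : Nat) (i st depth : Int),
    ((t.length : Int) - i).toNat = m → -(t.length : Int) ≤ i → (st = 0 ∨ st = 1 ∨ st = 2) →
    ∀ cs, pvGather t (PySem.List.pyRange i (t.length : Int) 1) = some cs →
    pvLoopA t start (PySem.List.pyRange i (t.length : Int) 1) depth (decide (st ≠ 0)) (decide (st = 2)) =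
      pvStage4 t start (pvDeltas cs (pvMask cs st)) (i - start) depth := by
  intro m
  induction m with
  | zero =>
    intro i st depth hm hlo hst cs hcs
    rw [pv_range_nil _ _ (by omega)] at hcs ⊢
    simp only [pvGather, Option.some.injEq] at hcs
    subst hcs
    rfl
  | succ m ih =>
    intro i st depth hm hlo hst cs hcs
    have hlt : i < (t.length : Int) := by omega
    rw [PySem.List.pyRange_one_cons hlt] at hcs ⊢
    obtain ⟨c, hc⟩ := pv_get_some t i hlo hlt
    rw [pvGather, hc] at hcs
    obtain ⟨cs', hcs'⟩ := pv_gather_some t m (i + 1) (by omega) (by omega)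
    rw [hcs'] at hcs
    simp only [Option.some.injEq] at hcs
    subst hcs
    rw [pvLoopA]
    simp only [hc]
    have hk1 : i + 1 - start = (i - start) + 1 := by ring
    rcases hst with h0 | h1 | h2
    · -- st = 0 : outside a string
      subst h0
      simp only [pvMask, pvDeltas, pvStage4]
      by_cases hq : c = '"'
      · subst hq
        have hA := ih (i + 1) 1 depth (by omega) (by omega) (by omega) cs' hcs'
        norm_num at hA
        rw [hk1] at hA
        simpa using hA
      · by_cases hob : c = '{'
        · subst hob
          have hA := ih (i + 1) 0 (depth + 1) (by omega) (by omega) (by omega) cs' hcs'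
          norm_num at hA
          rw [hk1] at hA
          simpa using hA
        · by_cases hcb : c = '}'
          · subst hcb
            by_cases hd : depth - 1 = 0
            · have hdd : depth = 1 := by omega
              subst hdd
              simp
            · have hA := ih (i + 1) 0 (depth - 1) (by omega) (by omega) (by omega) cs' hcs'
              norm_num at hA
              rw [hk1] at hA
              simp [hd, show depth + -1 = depth - 1 from by ring, hA]
          · simp only [if_neg hq, if_neg hob, if_neg hcb]
            have hA := ih (i + 1) 0 depth (by omega) (by omega) (by omega) cs' hcs'
            norm_num at hA
            rw [hk1] at hA
            simpa [hq, hob, hcb] using hA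
    · -- st = 1 : inside a string
      subst h1
      simp only [pvMask, pvDeltas, pvStage4]
      by_cases hb : c = '\\'
      · subst hb
        have hA := ih (i + 1) 2 depth (by omega) (by omega) (by omega) cs' hcs'
        norm_num at hA
        rw [hk1] at hA
        simpa using hA
      · by_cases hq : c = '"'
        · subst hq
          have hA := ih (i + 1) 0 depth (by omega) (by omega) (by omega) cs' hcs'
          norm_num at hA
          rw [hk1] at hA
          simpa using hA
        · have hA := ih (i + 1) 1 depth (by omega) (by omega) (by omega) cs' hcs'
          norm_num at hA
          rw [hk1] at hA
          simpa [hb, hq] using hA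
    · -- st = 2 : escape position inside a string
      subst h2
      simp only [pvMask, pvDeltas, pvStage4]
      have hA := ih (i + 1) 1 depth (by omega) (by omega) (by omega) cs' hcs'
      norm_num at hA
      rw [hk1] at hA
      simpa using hA

-- ===== VERDICT (by name: the statement is the Claim_ definition above) =====
theorem scan_balanced_py_spec : Claim_equal_scan_balanced_py := by
  intro text start _ hpre
  unfold Spec_scan_balanced_py scan_balanced_py scan_balanced_py_alt
  obtain ⟨cs, hcs⟩ := pv_gather_some text.toList
    (((text.toList.length : Int) - start).toNat) start rfl hpre
  rw [hcs]
  have hA := pv_main text.toList start (((text.toList.length : Int) - start).toNat)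
    start 0 0 rfl hpre (by omega) cs hcs
  norm_num at hA
  simpa using hA
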